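-- pv_equiv track=rewrite | github.com/fiberseq/FiberHMM | fiberhmm/io/ma_tags.py | parse_aq_array
-- ===== SOURCE A (Python) =====
-- from typing import Iterable, List, Sequence, Tuple
--
-- def parse_aq_array(aq, qual_spec_per_type: Sequence[str],
--                    n_annotations_per_type: Sequence[int]) -> List[List[int]]:
--     """Parse the flat AQ array into per-annotation quality lists.
--
--     Walks the AQ bytes consuming ``len(qual_spec)`` bytes per annotation,
--     in the same order as the MA string.
--     """
--     result: List[List[int]] = []
--     idx = 0
--     aq_list = list(aq) if aq is not None else []
--     for spec, n in zip(qual_spec_per_type, n_annotations_per_type):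
--         n_q = len(spec)
--         for _ in range(n):
--             if n_q == 0:
--                 result.append([])
--             else:
--                 result.append(aq_list[idx:idx + n_q])
--                 idx += n_q
--     return result
-- ===== SOURCE B (Python) =====
-- def parse_aq_array(aq, qual_spec_per_type, n_annotations_per_type):
--     """Parse the flat AQ array into per-annotation quality lists.
--
--     Table-of-offsets decomposition: first expand (spec, n) pairs into a flat
--     list of per-annotation lengths, then compute cumulative start offsets,
--     then slice aq once per annotation.
--     """
--     aq_list = list(aq) if aq is not None else []
--     lengths = [len(spec)
--                for spec, n in zip(qual_spec_per_type, n_annotations_per_type)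
--                for _ in range(n)]
--     starts = [0]
--     for L in lengths:
--         starts.append(starts[-1] + L)
--     return [aq_list[s:s + L] for s, L in zip(starts, lengths)]
-- ===== Notes on version B (the rewrite author's own statement) =====
-- stated objective: alternative
-- what changed: Replaces A's nested stateful loop with a mutable running index by a table-first decomposition: expand (spec, n) pairs into a flat list of per-annotation lengths, compute cumulative start offsets, then slice once per annotation in a single comprehension.
import Mathlib
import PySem

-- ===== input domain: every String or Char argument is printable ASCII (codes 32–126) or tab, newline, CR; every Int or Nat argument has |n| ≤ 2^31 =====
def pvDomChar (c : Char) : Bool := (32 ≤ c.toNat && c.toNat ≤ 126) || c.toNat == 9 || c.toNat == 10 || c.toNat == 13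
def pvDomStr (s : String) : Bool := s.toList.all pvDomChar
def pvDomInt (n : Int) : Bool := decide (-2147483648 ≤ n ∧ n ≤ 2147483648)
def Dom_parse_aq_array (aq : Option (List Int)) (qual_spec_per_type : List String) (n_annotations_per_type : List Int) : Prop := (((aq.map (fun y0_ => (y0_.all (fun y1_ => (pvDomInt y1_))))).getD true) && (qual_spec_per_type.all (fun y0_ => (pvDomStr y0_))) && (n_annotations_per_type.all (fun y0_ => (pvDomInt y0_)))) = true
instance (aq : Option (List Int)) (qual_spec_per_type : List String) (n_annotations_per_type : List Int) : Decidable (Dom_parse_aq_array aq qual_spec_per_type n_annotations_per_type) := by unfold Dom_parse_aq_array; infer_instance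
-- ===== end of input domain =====

-- B replaces A's nested stateful loop (mutable running index) by a lengths-table +
-- cumulative-offsets + one slicing pass decomposition; same cost, alternative structure.

-- ===== PORT A =====
-- literal transliteration of A: nested foldl over zip, state = (result, idx)
def parse_aq_array (aq : Option (List Int)) (qual_spec_per_type : List String) (n_annotations_per_type : List Int) : List (List Int) :=
  let aq_list : List Int := match aq with | some l => l | none => []
  let st := (qual_spec_per_type.zip n_annotations_per_type).foldl
    (fun (st : List (List Int) × Int) p =>
      let n_q : Int := PySem.Str.len p.1
      (PySem.List.pyRange 0 p.2 1).foldl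
        (fun st _ =>
          if n_q = 0 then (st.1 ++ [[]], st.2)
          else (st.1 ++ [PySem.List.slice aq_list (some st.2) (some (st.2 + n_q))], st.2 + n_q))
        st)
    ([], 0)
  st.1

-- ===== PORT B =====
-- literal transliteration of B: lengths table, cumulative starts, then one slicing map
def parse_aq_array_alt (aq : Option (List Int)) (qual_spec_per_type : List String) (n_annotations_per_type : List Int) : List (List Int) :=
  let aq_list : List Int := match aq with | some l => l | none => []
  let lengths : List Int := (qual_spec_per_type.zip n_annotations_per_type).flatMap
    (fun p => (PySem.List.pyRange 0 p.2 1).map (fun _ => PySem.Str.len p.1))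
  let starts : List Int := lengths.foldl (fun acc L => acc ++ [acc.getLast! + L]) [0]
  (starts.zip lengths).map (fun p => PySem.List.slice aq_list (some p.1) (some (p.1 + p.2)))

-- ===== PRECONDITION & SPEC =====
def Spec_parse_aq_array (aq : Option (List Int)) (qual_spec_per_type : List String) (n_annotations_per_type : List Int) (out : List (List Int)) : Prop := out = parse_aq_array_alt aq qual_spec_per_type n_annotations_per_type
instance (aq : Option (List Int)) (qual_spec_per_type : List String) (n_annotations_per_type : List Int) (out : List (List Int)) : Decidable (Spec_parse_aq_array aq qual_spec_per_type n_annotations_per_type out) := by unfold Spec_parse_aq_array; infer_instance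

-- ===== CLAIM (what is proved, stated in full; the proofs are below) =====
def Claim_equal_parse_aq_array : Prop := ∀ (aq : Option (List Int)) (qual_spec_per_type : List String) (n_annotations_per_type : List Int), Dom_parse_aq_array aq qual_spec_per_type n_annotations_per_type → Spec_parse_aq_array aq qual_spec_per_type n_annotations_per_type (parse_aq_array aq qual_spec_per_type n_annotations_per_type)

-- ===== LEMMAS AND PROOFS =====

-- canonical form both ports reduce to: slice at running offsets
def pvSliceGo (al : List Int) : List Int → Int → List (List Int)
  | [], _ => []
  | L :: Ls, s => PySem.List.slice al (some s) (some (s + L)) :: pvSliceGo al Ls (s + L)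

-- tail of the cumulative-sums scan
def pvScan (s : Int) : List Int → List Int
  | [] => []
  | L :: Ls => (s + L) :: pvScan (s + L) Ls

theorem pvSlice_self (al : List Int) (j : Int) :
    PySem.List.slice al (some j) (some j) = [] := by
  have h := PySem.List.length_slice al j j
  exact List.eq_nil_of_length_eq_zero (by omega)

theorem pvSliceGo_append (al : List Int) (L1 L2 : List Int) (s : Int) :
    pvSliceGo al (L1 ++ L2) s = pvSliceGo al L1 s ++ pvSliceGo al L2 (s + L1.sum) := by
  induction L1 generalizing s with
  | nil => simp [pvSliceGo]
  | cons L Ls ih => simp [pvSliceGo, ih, add_assoc]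

-- A's inner loop (over range(n)) as pvSliceGo over the constant lengths list
theorem pvInnerA (al : List Int) (L : Int) (hL : 0 ≤ L) (xs : List Int)
    (res : List (List Int)) (j : Int) :
    xs.foldl (fun st _ =>
        if L = 0 then (st.1 ++ [([] : List Int)], st.2)
        else (st.1 ++ [PySem.List.slice al (some st.2) (some (st.2 + L))], st.2 + L))
      (res, j)
    = (res ++ pvSliceGo al (xs.map (fun _ => L)) j, j + xs.length * L) := by
  have hstep : ∀ (st : List (List Int) × Int) (x : Int),
      (if L = 0 then (st.1 ++ [([] : List Int)], st.2)
       else (st.1 ++ [PySem.List.slice al (some st.2) (some (st.2 + L))], st.2 + L))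
      = (st.1 ++ [PySem.List.slice al (some st.2) (some (st.2 + L))], st.2 + L) := by
    intro st x
    by_cases h : L = 0
    · subst h; simp [pvSlice_self]
    · simp [h]
  rw [show (fun (st : List (List Int) × Int) (_ : Int) =>
        if L = 0 then (st.1 ++ [([] : List Int)], st.2)
        else (st.1 ++ [PySem.List.slice al (some st.2) (some (st.2 + L))], st.2 + L))
      = (fun (st : List (List Int) × Int) (_ : Int) =>
        (st.1 ++ [PySem.List.slice al (some st.2) (some (st.2 + L))], st.2 + L))
      from funext fun st => funext fun x => hstep st x]
  induction xs generalizing res j with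
  | nil => simp [pvSliceGo]
  | cons x t ih =>
    rw [List.foldl_cons, ih]
    simp only [List.map_cons, pvSliceGo, Prod.mk.injEq]
    refine ⟨by simp, by simp only [List.length_cons]; push_cast; ring⟩

-- A's outer loop
theorem pvOuterA (al : List Int) (ps : List (String × Int)) (res : List (List Int)) (j : Int) :
    ps.foldl (fun (st : List (List Int) × Int) p =>
      let n_q : Int := PySem.Str.len p.1
      (PySem.List.pyRange 0 p.2 1).foldl
        (fun st _ =>
          if n_q = 0 then (st.1 ++ [[]], st.2)
          else (st.1 ++ [PySem.List.slice al (some st.2) (some (st.2 + n_q))], st.2 + n_q))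
        st)
      (res, j)
    = (res ++ pvSliceGo al
        (ps.flatMap (fun p => (PySem.List.pyRange 0 p.2 1).map (fun _ => PySem.Str.len p.1))) j,
       j + (ps.flatMap (fun p => (PySem.List.pyRange 0 p.2 1).map (fun _ => PySem.Str.len p.1))).sum) := by
  induction ps generalizing res j with
  | nil => simp [pvSliceGo]
  | cons p t ih =>
    simp only [List.foldl_cons]
    rw [pvInnerA al (PySem.Str.len p.1) (by simp [PySem.Str.len_eq]) _ res j, ih]
    rw [List.flatMap_cons, pvSliceGo_append]
    simp only [Prod.mk.injEq]
    have hsum : ((PySem.List.pyRange 0 p.2 1).map (fun _ => PySem.Str.len p.1)).sum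
        = ((PySem.List.pyRange 0 p.2 1).length : Int) * PySem.Str.len p.1 :=
      PySem.List.sum_map_const_int _ _
    refine ⟨by simp, by simp only [List.sum_append, hsum]; ring⟩

-- B's starts fold is [0] followed by the scan
theorem pvStartsFold (Ls acc : List Int) (h : acc ≠ []) :
    Ls.foldl (fun acc L => acc ++ [acc.getLast! + L]) acc
    = acc ++ pvScan acc.getLast! Ls := by
  induction Ls generalizing acc with
  | nil => simp [pvScan]
  | cons L t ih =>
    simp only [List.foldl_cons]
    rw [ih (acc ++ [acc.getLast! + L]) (by simp)]
    simp [pvScan, List.append_assoc]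


-- mapping slices over zip(starts, lengths) is pvSliceGo
theorem pvZipMap (al : List Int) (Ls : List Int) (s : Int) :
    ((s :: pvScan s Ls).zip Ls).map
        (fun p => PySem.List.slice al (some p.1) (some (p.1 + p.2)))
    = pvSliceGo al Ls s := by
  induction Ls generalizing s with
  | nil => simp [pvSliceGo]
  | cons L t ih => simp [pvScan, pvSliceGo, List.zip_cons_cons, ih]

-- ===== VERDICT (by name: the statement is the Claim_ definition above) =====
theorem parse_aq_array_spec : Claim_equal_parse_aq_array := by
  intro aq qs ns _
  unfold Spec_parse_aq_array parse_aq_array parse_aq_array_alt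
  dsimp only
  rw [pvOuterA]
  rw [pvStartsFold _ [0] (by simp)]
  have h0 : ([0] : List Int).getLast! = 0 := rfl
  rw [h0]
  rw [show ([0] : List Int) ++ pvScan 0 _ = (0 : Int) :: pvScan 0 _ from rfl]
  rw [pvZipMap]
  simp
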